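-- pv_equiv track=rewrite | github.com/d14405011-sudo/2026-python | weeks/week-07/solutions/1114405011/10101/q10101.py | parse_side
-- ===== SOURCE A (Python) =====
-- def parse_side(s: str, off: int, side_sign: int):
--     i = 0
--     n = len(s)
--     sign = 1
--     if i < n and s[i] == "-":
--         sign = -1
--         i += 1
--     v = 0
--     cf = {}
--     while i < n:
--         j = i
--         while j < n and s[j].isdigit():
--             j += 1
--         token = s[i:j]
--         num = int(token)
--         v += sign * num
--         p = 1
--         for k in range(j - 1, i - 1, -1):
--             cf[off + k] = side_sign * sign * p
--             p *= 10
--         if j < n: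
--             sign = 1 if s[j] == "+" else -1
--         i = j + 1
--     return v, cf
-- ===== SOURCE B (Python) =====
-- def parse_side(s: str, off: int, side_sign: int):
--     # Phase 1: tokenize — one char-by-char pass collecting (start, digits, sign) terms.
--     n = len(s)
--     lead = s.startswith("-")
--     i0 = 1 if lead else 0
--     terms = []
--     start = i0
--     cur = []
--     sgn = -1 if lead else 1
--     for idx in range(i0, n):
--         c = s[idx]
--         if c.isdigit():
--             cur.append(c)
--         else:
--             terms.append((start, "".join(cur), sgn))
--             sgn = 1 if c == "+" else -1
--             cur = []
--             start = idx + 1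
--     if start < n:
--         terms.append((start, "".join(cur), sgn))
--     # Phase 2: evaluate the term list.
--     v = 0
--     cf = {}
--     for start, tok, sgn in terms:
--         num = int(tok)
--         v += sgn * num
--         L = len(tok)
--         for d in range(L - 1, -1, -1):
--             cf[off + start + d] = side_sign * sgn * 10 ** (L - 1 - d)
--     return v, cf
-- ===== Notes on version B (the rewrite author's own statement) =====
-- stated objective: alternative
-- what changed: A's single interleaved scan (nested index loops mutating v/cf/sign as it goes) is split into two phases: a char-by-char tokenizer with an accumulator producing a list of (start, digits, sign) terms, then a separate evaluation pass folding the term list into the value and coefficient dict.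
import Mathlib
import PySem

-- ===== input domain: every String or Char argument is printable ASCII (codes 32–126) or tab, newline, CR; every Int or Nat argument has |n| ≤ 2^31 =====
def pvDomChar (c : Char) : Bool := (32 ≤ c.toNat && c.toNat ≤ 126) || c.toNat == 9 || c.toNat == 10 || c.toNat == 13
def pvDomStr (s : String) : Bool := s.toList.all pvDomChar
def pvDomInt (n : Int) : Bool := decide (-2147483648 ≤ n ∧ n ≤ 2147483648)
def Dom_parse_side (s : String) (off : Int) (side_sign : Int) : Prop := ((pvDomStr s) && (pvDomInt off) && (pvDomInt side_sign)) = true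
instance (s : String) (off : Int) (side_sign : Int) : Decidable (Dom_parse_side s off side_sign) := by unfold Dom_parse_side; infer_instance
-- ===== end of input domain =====

-- B re-implements A as tokenize-then-evaluate (two phases) instead of A's interleaved scan; equal return value, neither mutates its arguments.

-- ===== PORT A =====
-- inner `while j < n and s[j].isdigit(): j += 1`
def scanDigits (cs : List Char) (j : Nat) : Nat :=
  if h : j < cs.length then
    if PySem.Chars.isdigit cs[j] then scanDigits cs (j + 1) else j
  else j
termination_by cs.length - j

theorem le_scanDigits (cs : List Char) (j : Nat) : j ≤ scanDigits cs j := by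
  unfold scanDigits
  split
  · split
    · have := le_scanDigits cs (j + 1); omega
    · exact le_refl j
  · exact le_refl j
termination_by cs.length - j

-- outer `while i < n: …` of A, threading (sign, v, cf)
def aLoop (cs : List Char) (off ss : Int) (i : Nat) (sign v : Int)
    (cf : PySem.Dict Int Int) : Int × PySem.Dict Int Int :=
  if h : i < cs.length then
    let j := scanDigits cs i
    let token := (cs.drop i).take (j - i)          -- s[i:j], indices in range
    let num := (PySem.Int.ofChars? token).getD 0   -- int(token); Pre_ excludes the none case
    let v' := v + sign * num
    let cf' := ((PySem.List.pyRange ((j : Int) - 1) ((i : Int) - 1) (-1)).foldl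
        (fun (st : PySem.Dict Int Int × Int) k =>
          (st.1.insert (off + k) (ss * sign * st.2), st.2 * 10)) (cf, 1)).1
    let sign' := if h2 : j < cs.length then (if cs[j] = '+' then (1 : Int) else -1) else sign
    aLoop cs off ss (j + 1) sign' v' cf'
  else (v, cf)
termination_by cs.length - i
decreasing_by have := le_scanDigits cs i; omega

def parse_side (s : String) (off : Int) (side_sign : Int) : Int × (List (Int × Int)) :=
  let cs := s.toList
  let p : Int × Nat := if cs[0]? = some '-' then (-1, 1) else (1, 0)
  let r := aLoop cs off side_sign p.2 p.1 0 PySem.Dict.empty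
  (r.1, r.2.items)

-- ===== PORT B =====
-- phase 1: char-by-char tokenizer with accumulator (B's first for-loop)
def tokGo (n : Nat) (rest : List Char) (idx start : Nat) (cur : List Char) (sgn : Int) :
    List (Nat × List Char × Int) :=
  match rest with
  | [] => if start < n then [(start, cur, sgn)] else []
  | c :: rs =>
    if PySem.Chars.isdigit c then tokGo n rs (idx + 1) start (cur ++ [c]) sgn
    else (start, cur, sgn) :: tokGo n rs (idx + 1) (idx + 1) [] (if c = '+' then 1 else -1)

-- phase 2: evaluate one term (body of B's second for-loop)
def evalTerm (off ss : Int) (st : Int × PySem.Dict Int Int) (t : Nat × List Char × Int) :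
    Int × PySem.Dict Int Int :=
  let num := (PySem.Int.ofChars? t.2.1).getD 0
  let v := st.1 + t.2.2 * num
  let L : Int := t.2.1.length
  let cf := (PySem.List.pyRange (L - 1) (-1) (-1)).foldl
      (fun cf d => cf.insert (off + (t.1 : Int) + d) (ss * t.2.2 * 10 ^ (L - 1 - d).toNat)) st.2
  (v, cf)

def parse_side_alt (s : String) (off : Int) (side_sign : Int) : Int × (List (Int × Int)) :=
  let cs := s.toList
  let lead := cs[0]? = some '-'
  let i0 : Nat := if lead then 1 else 0
  let sgn0 : Int := if lead then -1 else 1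
  let terms := tokGo cs.length (cs.drop i0) i0 i0 [] sgn0
  let r := terms.foldl (evalTerm off side_sign) (0, PySem.Dict.empty)
  (r.1, r.2.items)

-- ===== PRECONDITION & SPEC =====
-- Pre_ excludes exactly the inputs on which A raises ValueError (int('') on an empty digit
-- run): after the optional leading '-', some non-digit character stands at position 0 or
-- right after another non-digit.
def Pre_parse_side (s : String) (off : Int) (side_sign : Int) : Prop :=
  let l := if s.toList[0]? = some '-' then s.toList.tail else s.toList
  ∀ i, i < l.length → PySem.Chars.isdigit (l.getD i '0') = false →
    0 < i ∧ PySem.Chars.isdigit (l.getD (i - 1) '0') = true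
instance (s : String) (off : Int) (side_sign : Int) : Decidable (Pre_parse_side s off side_sign) := by
  unfold Pre_parse_side; infer_instance

def pvWitness_parse_side : String × Int × Int := ("-12+345-6", 4, -1)

def Spec_parse_side (s : String) (off : Int) (side_sign : Int) (out : Int × (List (Int × Int))) : Prop := out = parse_side_alt s off side_sign
instance (s : String) (off : Int) (side_sign : Int) (out : Int × (List (Int × Int))) : Decidable (Spec_parse_side s off side_sign out) := by unfold Spec_parse_side; infer_instance

-- ===== CLAIM (what is proved, stated in full; the proofs are below) =====
def Claim_equal_parse_side : Prop := ∀ (s : String) (off : Int) (side_sign : Int), Dom_parse_side s off side_sign → Pre_parse_side s off side_sign → Spec_parse_side s off side_sign (parse_side s off side_sign)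

-- ===== LEMMAS AND PROOFS =====

theorem scanDigits_le (cs : List Char) (j : Nat) (hj : j ≤ cs.length) :
    scanDigits cs j ≤ cs.length := by
  unfold scanDigits
  split
  · split
    · exact scanDigits_le cs (j + 1) (by omega)
    · omega
  · omega
termination_by cs.length - j

theorem scanDigits_stop (cs : List Char) (j : Nat) (h : scanDigits cs j < cs.length) :
    PySem.Chars.isdigit (cs.getD (scanDigits cs j) '0') = false := by
  by_cases hj : j < cs.length
  · by_cases hd : PySem.Chars.isdigit cs[j] = true
    · have hs : scanDigits cs j = scanDigits cs (j + 1) := by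
        rw [scanDigits, dif_pos hj, if_pos hd]
      rw [hs] at h ⊢
      exact scanDigits_stop cs (j + 1) h
    · have hs : scanDigits cs j = j := by
        rw [scanDigits, dif_pos hj, if_neg hd]
      rw [hs] at h ⊢
      rw [List.getD_eq_getElem cs '0' hj]
      simp only [Bool.not_eq_true] at hd
      exact hd
  · have hs : scanDigits cs j = j := by rw [scanDigits, dif_neg hj]
    rw [hs] at h
    exact absurd h hj
termination_by cs.length - j

-- the tokenizer absorbs a maximal digit run into its accumulator
theorem tok_digits (cs : List Char) (i start : Nat) (cur : List Char) (sgn : Int) :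
    tokGo cs.length (cs.drop i) i start cur sgn =
      tokGo cs.length (cs.drop (scanDigits cs i)) (scanDigits cs i) start
        (cur ++ (cs.drop i).take (scanDigits cs i - i)) sgn := by
  by_cases h : i < cs.length
  · by_cases hd : PySem.Chars.isdigit cs[i] = true
    · have hs : scanDigits cs i = scanDigits cs (i + 1) := by
        rw [scanDigits]; simp [h, hd]
      have hdrop : cs.drop i = cs[i] :: cs.drop (i + 1) :=
        List.drop_eq_getElem_cons h
      have hge : i + 1 ≤ scanDigits cs (i + 1) := le_scanDigits cs (i + 1)
      rw [hs, hdrop, tokGo]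
      simp only [hd, if_true]
      rw [tok_digits cs (i + 1) start (cur ++ [cs[i]]) sgn]
      congr 1
      have : scanDigits cs (i + 1) - i = (scanDigits cs (i + 1) - (i + 1)) + 1 := by omega
      rw [this, List.take_succ_cons, List.append_assoc, List.singleton_append]
    · have hs : scanDigits cs i = i := by
        rw [scanDigits]; simp [h]; intro hc; simp [hc] at hd
      rw [hs]; simp
  · have hs : scanDigits cs i = i := by rw [scanDigits]; simp [h]
    rw [hs]; simp
termination_by cs.length - i

-- per-term coefficient loops agree (A's (cf, p) pair-fold vs B's power formula)
theorem cf_fold_eq (off c : Int) (L i : Nat) (cf : PySem.Dict Int Int) (p : Int) :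
    ((PySem.List.pyRange ((i : Int) + L - 1) ((i : Int) - 1) (-1)).foldl
        (fun (st : PySem.Dict Int Int × Int) k =>
          (st.1.insert (off + k) (c * st.2), st.2 * 10)) (cf, p)).1 =
      (PySem.List.pyRange ((L : Int) - 1) (-1) (-1)).foldl
        (fun cf d => cf.insert (off + (i : Int) + d) (c * (10 ^ ((L : Int) - 1 - d).toNat * p))) cf := by
  induction L generalizing cf p with
  | zero =>
    rw [PySem.List.pyRange_neg_one_eq_nil (by omega), PySem.List.pyRange_neg_one_eq_nil (by omega)]
    rfl
  | succ L ih =>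
    have rA : PySem.List.pyRange ((i : Int) + ((L + 1 : Nat) : Int) - 1) ((i : Int) - 1) (-1) =
        ((i : Int) + (L : Int)) :: PySem.List.pyRange ((i : Int) + (L : Int) - 1) ((i : Int) - 1) (-1) := by
      have e : (i : Int) + ((L + 1 : Nat) : Int) - 1 = (i : Int) + (L : Int) := by push_cast; ring
      rw [e, PySem.List.pyRange_neg_one_cons (by omega)]
    have rB : PySem.List.pyRange (((L + 1 : Nat) : Int) - 1) (-1) (-1) =
        (L : Int) :: PySem.List.pyRange ((L : Int) - 1) (-1) (-1) := by
      have e : ((L + 1 : Nat) : Int) - 1 = (L : Int) := by push_cast; ring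
      rw [e, PySem.List.pyRange_neg_one_cons (by omega)]
    rw [rA, rB]
    simp only [List.foldl_cons]
    have hfirst : cf.insert (off + ((i : Int) + (L : Int))) (c * p) =
        cf.insert (off + (i : Int) + (L : Int))
          (c * (10 ^ (((L + 1 : Nat) : Int) - 1 - (L : Int)).toNat * p)) := by
      have e : (((L + 1 : Nat) : Int) - 1 - (L : Int)).toNat = 0 := by push_cast; omega
      rw [e]
      ring_nf
    rw [hfirst, ih]
    apply PySem.List.foldl_congr_mem
    intro acc d hd
    have hdb := (PySem.List.mem_pyRange_neg_one).1 hd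
    congr 1
    have h1 : ((L : Int) - 1 - d).toNat + 1 = (((L + 1 : Nat) : Int) - 1 - d).toNat := by
      push_cast; omega
    rw [← h1, pow_succ]
    ring

-- one outer A-iteration equals evalTerm on the corresponding term
theorem step_eq (cs : List Char) (off ss : Int) (i : Nat) (sign v : Int)
    (cf : PySem.Dict Int Int) (hi : i ≤ cs.length) :
    (v + sign * (PySem.Int.ofChars? ((cs.drop i).take (scanDigits cs i - i))).getD 0,
      ((PySem.List.pyRange ((scanDigits cs i : Int) - 1) ((i : Int) - 1) (-1)).foldl
        (fun (st : PySem.Dict Int Int × Int) k =>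
          (st.1.insert (off + k) (ss * sign * st.2), st.2 * 10)) (cf, 1)).1) =
      evalTerm off ss (v, cf) (i, (cs.drop i).take (scanDigits cs i - i), sign) := by
  have hij := le_scanDigits cs i
  have hjn := scanDigits_le cs i hi
  unfold evalTerm
  simp only [Prod.mk.injEq, true_and]
  have hlen : ((cs.drop i).take (scanDigits cs i - i)).length = scanDigits cs i - i := by
    simp only [List.length_take, List.length_drop]
    omega
  rw [hlen]
  have hc : ((scanDigits cs i : Int)) - 1 = (i : Int) + ((scanDigits cs i - i : Nat) : Int) - 1 := by
    omega
  rw [hc, cf_fold_eq off (ss * sign) (scanDigits cs i - i) i cf 1]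
  apply PySem.List.foldl_congr_mem
  intro acc d hd
  congr 1
  ring

-- main bridge: A's loop from position i = fold of evalTerm over the tokenizer output from i
theorem main_bridge (cs : List Char) (off ss : Int) (i : Nat) (sign v : Int)
    (cf : PySem.Dict Int Int) :
    aLoop cs off ss i sign v cf =
      (tokGo cs.length (cs.drop i) i i [] sign).foldl (evalTerm off ss) (v, cf) := by
  by_cases h : i < cs.length
  · have hij := le_scanDigits cs i
    have hjn := scanDigits_le cs i (by omega)
    rw [aLoop, dif_pos h, tok_digits cs i i [] sign]
    simp only [List.nil_append]
    by_cases h2 : scanDigits cs i < cs.length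
    · have hdrop : cs.drop (scanDigits cs i) = cs[scanDigits cs i] :: cs.drop (scanDigits cs i + 1) :=
        List.drop_eq_getElem_cons h2
      have hstop : PySem.Chars.isdigit (cs[scanDigits cs i]'h2) = false := by
        have := scanDigits_stop cs i h2
        rwa [List.getD_eq_getElem cs '0' h2] at this
      rw [hdrop, tokGo, if_neg (by simp [hstop])]
      simp only [List.foldl_cons, dif_pos h2]
      rw [main_bridge cs off ss (scanDigits cs i + 1)
        (if cs[scanDigits cs i] = '+' then (1 : Int) else -1) _ _]
      rw [← step_eq cs off ss i sign v cf (by omega)]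
    · have hnil : cs.drop (scanDigits cs i) = [] := List.drop_eq_nil_of_le (by omega)
      rw [hnil, tokGo, if_pos h]
      simp only [List.foldl_cons, List.foldl_nil]
      rw [aLoop, dif_neg (by omega : ¬ scanDigits cs i + 1 < cs.length)]
      rw [← step_eq cs off ss i sign v cf (by omega)]
  · rw [aLoop, dif_neg h, List.drop_eq_nil_of_le (by omega), tokGo, if_neg h, List.foldl_nil]
termination_by cs.length - i
decreasing_by have := le_scanDigits cs i; omega

-- ===== VERDICT (by name: the statement is the Claim_ definition above) =====
theorem parse_side_spec : Claim_equal_parse_side := by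
  intro s off ss _ _
  unfold Spec_parse_side parse_side parse_side_alt
  by_cases h : s.toList[0]? = some '-' <;> simp [h, main_bridge]
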